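-- pv_equiv track=rewrite | github.com/asweigart/programmedpatterns | src/progpat/__init__.py | vis21
-- ===== SOURCE A (Python) =====
-- def vis21(n):  # DONE
--     """
--     Exercise #21
--     1   2    3     4      5
--     OO  OO   OOO   OOOO   OOOOO
--     OO  OO   OOO   OOOO   OOOOO
--         OOO  OOO   OOOO   OOOOO
--         OOO  OOO   OOOO   OOOOO
--              OOOO  OOOO   OOOOO
--              OOOO  OOOO   OOOOO
--                    OOOOO  OOOOO
--                    OOOOO  OOOOO
--                           OOOOOO
--                           OOOOOO
--
--     Number of Os:
--     4   10   20    34     52"""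
--     result = ''
--     for i in range(n * 2):
--         result += 'O' * n
--         if i >= (n * 2) - 2:
--             result += 'O\n'
--         else:
--             result += '\n'
--
--     return result
-- ===== SOURCE B (Python) =====
-- def vis21(n):
--     if n < 1:
--         return ''
--     return ('O' * n + '\n') * (2 * n - 2) + ('O' * (n + 1) + '\n') * 2
-- ===== Notes on version B (the rewrite author's own statement) =====
-- stated objective: simpler
-- what changed: Replaced the row-by-row loop with its per-iteration branch by a closed-form expression built with string multiplication: the full-width row repeated for all but the last pair of rows, followed by the one-character-wider row repeated for the final pair.
import Mathlib
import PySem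

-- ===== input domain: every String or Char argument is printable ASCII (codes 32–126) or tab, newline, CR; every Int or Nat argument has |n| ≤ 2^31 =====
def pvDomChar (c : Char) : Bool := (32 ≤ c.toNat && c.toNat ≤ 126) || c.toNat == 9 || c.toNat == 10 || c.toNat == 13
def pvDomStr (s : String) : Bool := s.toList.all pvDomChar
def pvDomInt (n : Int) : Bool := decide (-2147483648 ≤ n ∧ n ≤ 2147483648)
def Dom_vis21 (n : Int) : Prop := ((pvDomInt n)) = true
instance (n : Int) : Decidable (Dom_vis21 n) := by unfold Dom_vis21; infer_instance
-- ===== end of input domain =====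

-- B replaces A's 2n-iteration row loop with a closed-form concatenation of repeated rows (simpler).


-- ===== PORT A =====
-- literal port of A: fold over range(n*2), appending 'O'*n then 'O\n' or '\n' per iteration
def vis21 (n : Int) : String :=
  String.ofList ((PySem.List.pyRange 0 (n * 2)).foldl
    (fun result i =>
      let result := result ++ PySem.List.pyRepeat ['O'] n
      if i ≥ n * 2 - 2 then result ++ ['O', '\n'] else result ++ ['\n'])
    [])

-- ===== PORT B =====
-- literal port of B: closed form, (2n-2) full rows then 2 one-wider rows
def vis21_alt (n : Int) : String :=
  if n < 1 then ""
  else String.ofList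
    (PySem.List.pyRepeat (PySem.List.pyRepeat ['O'] n ++ ['\n']) (2 * n - 2)
      ++ PySem.List.pyRepeat (PySem.List.pyRepeat ['O'] (n + 1) ++ ['\n']) 2)

-- ===== PRECONDITION & SPEC =====
def Spec_vis21 (n : Int) (out : String) : Prop := out = vis21_alt n
instance (n : Int) (out : String) : Decidable (Spec_vis21 n out) := by unfold Spec_vis21; infer_instance

-- ===== CLAIM (what is proved, stated in full; the proofs are below) =====
def Claim_equal_vis21 : Prop := ∀ (n : Int), Dom_vis21 n → Spec_vis21 n (vis21 n)

-- ===== LEMMAS AND PROOFS =====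

theorem vis21_flatMap_const {α β : Type} (l : List α) (r : List β) :
    l.flatMap (fun _ => r) = (List.replicate l.length r).flatten := by
  induction l with
  | nil => rfl
  | cons x xs ih => simp [List.flatMap_cons, List.replicate_succ, ih]

-- ===== VERDICT (by name: the statement is the Claim_ definition above) =====
theorem vis21_spec : Claim_equal_vis21 := by
  intro n _
  unfold Spec_vis21 vis21 vis21_alt
  by_cases h : n < 1
  · rw [if_pos h, PySem.List.pyRange_one_eq_nil (by omega)]
    rfl
  · rw [if_neg h]
    rw [PySem.List.pyRange_one_append 0 (n * 2 - 2) (n * 2) (by omega) (by omega),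
        List.foldl_append]
    -- first 2n-2 iterations take the '\n' branch
    rw [PySem.List.foldl_congr_mem (PySem.List.pyRange 0 (n * 2 - 2)) _
      (fun acc _ => acc ++ (PySem.List.pyRepeat ['O'] n ++ ['\n'])) []
      (by
        intro acc x hx
        rw [PySem.List.mem_pyRange_one] at hx
        simp only [if_neg (by omega : ¬ x ≥ n * 2 - 2), List.append_assoc])]
    rw [PySem.List.foldl_append_eq_flatMap, List.nil_append,
        vis21_flatMap_const, PySem.List.length_pyRange_one]
    -- last two iterations take the 'O\n' branch
    rw [PySem.List.pyRange_one_cons (by omega : n * 2 - 2 < n * 2)]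
    rw [PySem.List.pyRange_one_cons (by omega : n * 2 - 2 + 1 < n * 2)]
    rw [PySem.List.pyRange_one_eq_nil (by omega : n * 2 ≤ n * 2 - 2 + 1 + 1)]
    simp only [List.foldl_cons, List.foldl_nil,
      if_pos (by omega : n * 2 - 2 ≥ n * 2 - 2),
      if_pos (by omega : n * 2 - 2 + 1 ≥ n * 2 - 2)]
    simp only [PySem.List.pyRepeat_singleton]
    simp only [PySem.List.pyRepeat]
    have hsub : (n * 2 - 2 - 0).toNat = (2 * n - 2).toNat := by omega
    have hrep : List.replicate (n + 1).toNat 'O'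
        = List.replicate n.toNat 'O' ++ ['O'] := by
      have : (n + 1).toNat = n.toNat + 1 := by omega
      rw [this, List.replicate_succ']
    rw [hsub, hrep]
    simp [List.append_assoc]
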